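-- pv_equiv track=rewrite | github.com/muraliparimi/python_oop | password_checker.py | multi_password_strength_counter
-- ===== SOURCE A (Python) =====
-- import string
--
-- def multi_password_strength_counter(passwords):
--     special_characters = "!@#$%^&*()-+"
--
--     # implement this
--     res = []
--     uppercase_letters = string.ascii_uppercase
--     lowercase_letters = string.ascii_lowercase
--     numbers = [i for i in range(10)]
--     for password in passwords:
--         d =dict([('length', False), ('lowercase', False), ('uppercase', False), ('special_char', False), ('digit', False)])
--         for char in password:
--             if ord(char) >= 97 and ord(char) <= 122:
--                 d['lowercase'] = True
--                 break
--         for char in password: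
--             if ord(char) >= 65 and ord(char) <= 90:
--                 d['uppercase'] = True
--                 break
--         for char in password:
--             if char in special_characters:
--                 d['special_char'] = True
--                 break
--         for char in password:
--             if char.isdigit():
--                 d['digit'] = True
--         if len(password) >=8:
--             d['length'] = True
--         res.append(d)
--     return res
-- ===== SOURCE B (Python) =====
-- import string
--
-- def multi_password_strength_counter(passwords):
--     special_characters = "!@#$%^&*()-+"
--     res = []
--     for password in passwords:
--         low = up = spec = dig = False
--         for ch in password:
--             o = ord(ch)
--             low = low or (97 <= o <= 122)
--             up = up or (65 <= o <= 90)
--             spec = spec or (ch in special_characters)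
--             dig = dig or ch.isdigit()
--         res.append({'length': len(password) >= 8, 'lowercase': low,
--                     'uppercase': up, 'special_char': spec, 'digit': dig})
--     return res
-- ===== Notes on version B (the rewrite author's own statement) =====
-- stated objective: simpler
-- what changed: One fused single pass per password maintaining four boolean flags replaces A's four separate scans and the mutated dict; the result dict is built once from the computed flags.
import Mathlib
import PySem

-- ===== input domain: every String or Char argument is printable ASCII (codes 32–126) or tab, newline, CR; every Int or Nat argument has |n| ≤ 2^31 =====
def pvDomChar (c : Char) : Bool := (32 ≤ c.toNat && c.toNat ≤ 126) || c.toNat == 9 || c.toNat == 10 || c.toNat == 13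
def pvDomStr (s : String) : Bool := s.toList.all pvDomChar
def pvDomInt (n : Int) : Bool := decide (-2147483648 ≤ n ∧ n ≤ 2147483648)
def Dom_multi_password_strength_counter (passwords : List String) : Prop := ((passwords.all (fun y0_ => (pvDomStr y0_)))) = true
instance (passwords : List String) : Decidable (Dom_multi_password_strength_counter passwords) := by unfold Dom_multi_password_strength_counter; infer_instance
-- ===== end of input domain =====

-- B replaces A's four separate break-scans over each password and its mutated dict by one
-- fused pass keeping four boolean flags, building each result dict once (objective: simpler).

-- shared data constant: the special_characters string (as its char list)
def pwSpecialChars : List Char := "!@#$%^&*()-+".toList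

-- ===== PORT A =====
-- for char in password: if 97 <= ord(char) <= 122: d['lowercase'] = True; break
def aLower : List Char → PySem.Dict String Bool → PySem.Dict String Bool
  | [], d => d
  | c :: rest, d =>
      if 97 ≤ c.toNat ∧ c.toNat ≤ 122 then d.insert "lowercase" true else aLower rest d

-- for char in password: if 65 <= ord(char) <= 90: d['uppercase'] = True; break
def aUpper : List Char → PySem.Dict String Bool → PySem.Dict String Bool
  | [], d => d
  | c :: rest, d =>
      if 65 ≤ c.toNat ∧ c.toNat ≤ 90 then d.insert "uppercase" true else aUpper rest d

-- for char in password: if char in special_characters: d['special_char'] = True; break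
-- ('char in str' for a single char is exactly list membership)
def aSpecial : List Char → PySem.Dict String Bool → PySem.Dict String Bool
  | [], d => d
  | c :: rest, d =>
      if pwSpecialChars.contains c then d.insert "special_char" true else aSpecial rest d

-- for char in password: if char.isdigit(): d['digit'] = True   (no break)
def aDigit : List Char → PySem.Dict String Bool → PySem.Dict String Bool
  | [], d => d
  | c :: rest, d =>
      aDigit rest (if PySem.Chars.isdigit c then d.insert "digit" true else d)

-- one iteration of A's outer loop body
def aOne (password : String) : List (String × Bool) :=
  let d0 : PySem.Dict String Bool :=
    PySem.Dict.ofList [("length", false), ("lowercase", false), ("uppercase", false),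
                       ("special_char", false), ("digit", false)]
  let d1 := aLower password.toList d0
  let d2 := aUpper password.toList d1
  let d3 := aSpecial password.toList d2
  let d4 := aDigit password.toList d3
  let d5 := if 8 ≤ password.toList.length then d4.insert "length" true else d4
  d5.items

def multi_password_strength_counter (passwords : List String) : List (List (String × Bool)) :=
  passwords.map aOne

-- ===== PORT B =====
-- one fused pass: (low, up, spec, dig) flags updated by or-ing the same predicates
def bStep (acc : Bool × Bool × Bool × Bool) (c : Char) : Bool × Bool × Bool × Bool :=
  (acc.1 || (decide (97 ≤ c.toNat) && decide (c.toNat ≤ 122)),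
   acc.2.1 || (decide (65 ≤ c.toNat) && decide (c.toNat ≤ 90)),
   acc.2.2.1 || pwSpecialChars.contains c,
   acc.2.2.2 || PySem.Chars.isdigit c)

def bOne (password : String) : List (String × Bool) :=
  let f := password.toList.foldl bStep (false, false, false, false)
  [("length", decide (8 ≤ password.toList.length)), ("lowercase", f.1),
   ("uppercase", f.2.1), ("special_char", f.2.2.1), ("digit", f.2.2.2)]

def multi_password_strength_counter_alt (passwords : List String) : List (List (String × Bool)) :=
  passwords.map bOne

-- ===== PRECONDITION & SPEC =====
def Spec_multi_password_strength_counter (passwords : List String) (out : List (List (String × Bool))) : Prop := out = multi_password_strength_counter_alt passwords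
instance (passwords : List String) (out : List (List (String × Bool))) : Decidable (Spec_multi_password_strength_counter passwords out) := by unfold Spec_multi_password_strength_counter; infer_instance

-- ===== CLAIM (what is proved, stated in full; the proofs are below) =====
def Claim_equal_multi_password_strength_counter : Prop := ∀ (passwords : List String), Dom_multi_password_strength_counter passwords → Spec_multi_password_strength_counter passwords (multi_password_strength_counter passwords)

-- ===== LEMMAS AND PROOFS =====

def pLow (c : Char) : Bool := decide (97 ≤ c.toNat) && decide (c.toNat ≤ 122)
def pUp (c : Char) : Bool := decide (65 ≤ c.toNat) && decide (c.toNat ≤ 90)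
def pSpec (c : Char) : Bool := pwSpecialChars.contains c
def pDig (c : Char) : Bool := PySem.Chars.isdigit c

theorem aLower_eq (cs : List Char) (d : PySem.Dict String Bool) :
    aLower cs d = if cs.any pLow then d.insert "lowercase" true else d := by
  induction cs with
  | nil => simp [aLower]
  | cons c rest ih =>
    by_cases h : 97 ≤ c.toNat ∧ c.toNat ≤ 122
    · simp [aLower, h, pLow, List.any_cons]
    · simp [aLower, h, ih, pLow, List.any_cons]

theorem aUpper_eq (cs : List Char) (d : PySem.Dict String Bool) :
    aUpper cs d = if cs.any pUp then d.insert "uppercase" true else d := by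
  induction cs with
  | nil => simp [aUpper]
  | cons c rest ih =>
    by_cases h : 65 ≤ c.toNat ∧ c.toNat ≤ 90
    · simp [aUpper, h, pUp, List.any_cons]
    · simp [aUpper, h, ih, pUp, List.any_cons]

theorem aSpecial_eq (cs : List Char) (d : PySem.Dict String Bool) :
    aSpecial cs d = if cs.any pSpec then d.insert "special_char" true else d := by
  induction cs with
  | nil => simp [aSpecial]
  | cons c rest ih =>
    by_cases h : c ∈ pwSpecialChars
    · simp [aSpecial, h, pSpec, List.any_cons]
    · simp [aSpecial, h, ih, pSpec, List.any_cons]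

theorem aDigit_eq (cs : List Char) (d : PySem.Dict String Bool) :
    aDigit cs d = if cs.any pDig then d.insert "digit" true else d := by
  induction cs generalizing d with
  | nil => simp [aDigit]
  | cons c rest ih =>
    by_cases h : PySem.Chars.isdigit c
    · simp [aDigit, h, ih, pDig, List.any_cons, PySem.Dict.insert_insert_self]
    · simp [aDigit, h, ih, pDig, List.any_cons]

theorem bFold_eq (cs : List Char) (a b c d : Bool) :
    cs.foldl bStep (a, b, c, d) =
      (a || cs.any pLow, b || cs.any pUp, c || cs.any pSpec, d || cs.any pDig) := by
  induction cs generalizing a b c d with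
  | nil => simp
  | cons x rest ih =>
    simp [bStep, ih, pLow, pUp, pSpec, pDig, List.any_cons, Bool.or_assoc]

theorem one_eq (s : String) : aOne s = bOne s := by
  simp only [aOne, bOne, aLower_eq, aUpper_eq, aSpecial_eq, aDigit_eq, bFold_eq]
  by_cases h1 : s.toList.any pLow <;>
  by_cases h2 : s.toList.any pUp <;>
  by_cases h3 : s.toList.any pSpec <;>
  by_cases h4 : s.toList.any pDig <;>
  by_cases h5 : 8 ≤ s.length <;>
  simp [h1, h2, h3, h4, h5] <;> rfl

-- ===== VERDICT (by name: the statement is the Claim_ definition above) =====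
theorem multi_password_strength_counter_spec : Claim_equal_multi_password_strength_counter := by
  intro passwords _
  unfold Spec_multi_password_strength_counter multi_password_strength_counter multi_password_strength_counter_alt
  simp [one_eq]
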